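-- pv_equiv track=rewrite | github.com/PlamenPlamenovStanchev/Tic-Tac-Toe | Tic_Tac_Toe/tic_tac_toe_console.py | is_win_cols
-- ===== SOURCE A (Python) =====
-- def is_win_cols(board_, curr_sign):
--     for col_ in range(len(board_)):
--         current_col = []
--         for row_ in range(len(board_)):
--             current_col.append(board_[row_][col_] == curr_sign)
--         if all(current_col):
--             return True
--     return False
-- ===== SOURCE B (Python) =====
-- def is_win_cols(board_, curr_sign):
--     candidates = list(range(len(board_)))
--     for row in board_:
--         candidates = [c for c in candidates if row[c] == curr_sign]
--         if not candidates:
--             return False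
--     return bool(candidates)
-- ===== Notes on version B (the rewrite author's own statement) =====
-- stated objective: faster
-- what changed: Row-major single sweep that prunes a maintained list of candidate column indices, exiting as soon as no candidate survives, instead of A's column-major build-a-full-boolean-list-then-all per column.
-- outside the precondition, e.g. on is_win_cols([['x'], ['x']], 'x'): A returns True, B raises IndexError
import Mathlib
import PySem

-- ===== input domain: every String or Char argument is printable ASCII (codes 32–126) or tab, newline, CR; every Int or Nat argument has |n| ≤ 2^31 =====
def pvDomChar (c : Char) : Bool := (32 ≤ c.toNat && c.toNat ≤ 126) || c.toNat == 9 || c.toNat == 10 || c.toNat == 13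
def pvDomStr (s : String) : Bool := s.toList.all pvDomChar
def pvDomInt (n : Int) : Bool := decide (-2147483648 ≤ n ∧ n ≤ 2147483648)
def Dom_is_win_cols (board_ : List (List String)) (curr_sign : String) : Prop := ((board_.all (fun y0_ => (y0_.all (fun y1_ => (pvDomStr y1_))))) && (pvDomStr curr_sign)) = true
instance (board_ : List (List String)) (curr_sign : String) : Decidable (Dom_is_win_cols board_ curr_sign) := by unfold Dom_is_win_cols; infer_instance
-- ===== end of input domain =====

-- B replaces A's column-major build-list-then-all scan by a row-major sweep pruning candidate
-- column indices (alternative decomposition, same asymptotic cost). Return-value equivalence only.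

-- ===== PORT A =====
def is_win_cols (board_ : List (List String)) (curr_sign : String) : Bool :=
  (PySem.List.pyRange 0 (board_.length : Int) 1).any (fun col_ =>
    let current_col := (PySem.List.pyRange 0 (board_.length : Int) 1).map (fun row_ =>
      PySem.List.pyGetD (PySem.List.pyGetD board_ row_ []) col_ "" == curr_sign)
    current_col.all id)

-- ===== PORT B =====
def altPrune (curr_sign : String) (rows : List (List String)) (cands : List Int) : Bool :=
  match rows with
  | [] => !cands.isEmpty
  | row :: rest =>
    let cands' := cands.filter (fun c => PySem.List.pyGetD row c "" == curr_sign)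
    if cands'.isEmpty then false else altPrune curr_sign rest cands'

def is_win_cols_alt (board_ : List (List String)) (curr_sign : String) : Bool :=
  altPrune curr_sign board_ (PySem.List.pyRange 0 (board_.length : Int) 1)

-- ===== PRECONDITION & SPEC =====
-- Pre_ excludes ragged boards with a row shorter than the number of rows: A raises IndexError on
-- most of them, and on the rest (an all-matching column found before any short row is indexed,
-- e.g. [["x"],["x"]] with "x") B's own algorithm raises IndexError while A returns True.
def Pre_is_win_cols (board_ : List (List String)) (curr_sign : String) : Prop :=
  ∀ row ∈ board_, board_.length ≤ row.length
instance (board_ : List (List String)) (curr_sign : String) : Decidable (Pre_is_win_cols board_ curr_sign) := by unfold Pre_is_win_cols; infer_instance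

def pvWitness_is_win_cols : List (List String) × String := ([["x", "o"], ["o", "x"]], "x")

def Spec_is_win_cols (board_ : List (List String)) (curr_sign : String) (out : Bool) : Prop := out = is_win_cols_alt board_ curr_sign
instance (board_ : List (List String)) (curr_sign : String) (out : Bool) : Decidable (Spec_is_win_cols board_ curr_sign out) := by unfold Spec_is_win_cols; infer_instance

-- ===== CLAIM (what is proved, stated in full; the proofs are below) =====
def Claim_equal_is_win_cols : Prop := ∀ (board_ : List (List String)) (curr_sign : String), Dom_is_win_cols board_ curr_sign → Pre_is_win_cols board_ curr_sign → Spec_is_win_cols board_ curr_sign (is_win_cols board_ curr_sign)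

-- ===== LEMMAS AND PROOFS =====

-- B's loop invariant: the prune loop succeeds iff some candidate column matches in every row.
lemma altPrune_iff (curr : String) (rows : List (List String)) (cands : List Int) :
    altPrune curr rows cands = true ↔
      ∃ c ∈ cands, ∀ row ∈ rows, (PySem.List.pyGetD row c "" == curr) = true := by
  induction rows generalizing cands with
  | nil => simp [altPrune, List.eq_nil_iff_forall_not_mem]
  | cons row rest ih =>
    simp only [altPrune]
    by_cases h : (cands.filter (fun c => PySem.List.pyGetD row c "" == curr)).isEmpty
    · rw [List.isEmpty_iff] at h
      simp only [h, if_pos List.isEmpty_nil]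
      constructor
      · intro hf; exact absurd hf (by simp)
      · rintro ⟨c, hc, hall⟩
        have : c ∈ cands.filter (fun c => PySem.List.pyGetD row c "" == curr) := by
          rw [List.mem_filter]; exact ⟨hc, hall row (by simp)⟩
        rw [h] at this; simp at this
    · rw [if_neg h, ih]
      constructor
      · rintro ⟨c, hc, hall⟩
        rw [List.mem_filter] at hc
        exact ⟨c, hc.1, by intro r hr; rw [List.mem_cons] at hr; rcases hr with rfl | hr; exacts [hc.2, hall r hr]⟩
      · rintro ⟨c, hc, hall⟩
        refine ⟨c, List.mem_filter.mpr ⟨hc, hall row (by simp)⟩, fun r hr => hall r (by simp [hr])⟩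

-- Rows of board_ are exactly pyGetD board_ r [] for r in range(len(board_)).
lemma forall_rows_iff (board_ : List (List String)) (P : List String → Prop) :
    (∀ row ∈ board_, P row) ↔
      (∀ r ∈ PySem.List.pyRange 0 (board_.length : Int) 1, P (PySem.List.pyGetD board_ r [])) := by
  conv_lhs => rw [← PySem.List.map_pyGetD_pyRange_zero' board_ ([] : List String)]
  simp only [List.forall_mem_map]

theorem is_win_cols_spec : Claim_equal_is_win_cols := by
  intro board_ curr_sign _ _
  unfold Spec_is_win_cols is_win_cols is_win_cols_alt
  rw [Bool.eq_iff_iff, List.any_eq_true, altPrune_iff]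
  constructor
  · rintro ⟨col, hcol, hall⟩
    refine ⟨col, hcol, ?_⟩
    rw [forall_rows_iff]
    intro r hr
    have := List.all_eq_true.mp hall _ (List.mem_map_of_mem hr)
    simpa using this
  · rintro ⟨col, hcol, hall⟩
    rw [forall_rows_iff] at hall
    refine ⟨col, hcol, List.all_eq_true.mpr ?_⟩
    rintro b hb
    rw [List.mem_map] at hb
    obtain ⟨r, hr, rfl⟩ := hb
    simpa using hall r hr
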